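-- pv_equiv track=rewrite | github.com/ignajaja/coding-II | practica/practica_while.py | todos_pares
-- ===== SOURCE A (Python) =====
-- def todos_pares(num):
--     if num == 0:
--         return True
--     while num > 0:
--         if not (num % 10) % 2 == 0:
--             return False
--         num //= 10
--     return True
-- ===== SOURCE B (Python) =====
-- def todos_pares(num):
--     if num <= 0:
--         return True
--     return all(int(d) % 2 == 0 for d in str(num))
-- ===== Notes on version B (the rewrite author's own statement) =====
-- stated objective: idiomatic
-- what changed: B tests the digits of the decimal string form str(num) with all(), instead of A's while loop extracting digits arithmetically by repeated modulus and floor division.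
import Mathlib
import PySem

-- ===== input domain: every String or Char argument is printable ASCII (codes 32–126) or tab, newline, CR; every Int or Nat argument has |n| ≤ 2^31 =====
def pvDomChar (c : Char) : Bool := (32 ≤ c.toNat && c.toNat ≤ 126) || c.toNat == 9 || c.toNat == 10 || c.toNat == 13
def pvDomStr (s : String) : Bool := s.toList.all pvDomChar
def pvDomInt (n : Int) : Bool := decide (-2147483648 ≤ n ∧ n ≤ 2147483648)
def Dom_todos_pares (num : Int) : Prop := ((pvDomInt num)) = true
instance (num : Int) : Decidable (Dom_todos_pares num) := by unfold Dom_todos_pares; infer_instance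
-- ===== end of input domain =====

-- B checks the digits of the decimal string form instead of A's arithmetic %10 // 10 loop (idiomatic rewrite, same cost).

-- ===== PORT A =====
-- the 'while num > 0' loop of A, step for step
def todosParesLoop (num : Int) : Bool :=
  if num > 0 then
    if ¬ (PySem.Int.mod (PySem.Int.mod num 10) 2 == 0) then false
    else todosParesLoop (PySem.Int.floordiv num 10)
  else true
termination_by num.toNat
decreasing_by
  rw [PySem.Int.floordiv_eq_ediv_of_pos (by omega : (0:Int) < 10)]
  omega

def todos_pares (num : Int) : Bool :=
  if num == 0 then true
  else todosParesLoop num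

-- ===== PORT B =====
-- int(d) % 2 == 0 for a single decimal digit char d; exact on the digit chars '0'..'9' str() produces for a positive int
def todosParesEvenDigit (c : Char) : Bool := (c.toNat - 48) % 2 == 0

def todos_pares_alt (num : Int) : Bool :=
  if num ≤ 0 then true
  else (PySem.Int.toChars num).all todosParesEvenDigit

-- ===== PRECONDITION & SPEC =====
def Spec_todos_pares (num : Int) (out : Bool) : Prop := out = todos_pares_alt num
instance (num : Int) (out : Bool) : Decidable (Spec_todos_pares num out) := by unfold Spec_todos_pares; infer_instance

-- ===== CLAIM (what is proved, stated in full; the proofs are below) =====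
def Claim_equal_todos_pares : Prop := ∀ (num : Int), Dom_todos_pares num → Spec_todos_pares num (todos_pares num)

-- ===== LEMMAS AND PROOFS =====

-- "every decimal digit of n is even", in A's arithmetic shape, on Nat
def pvAux (n : Nat) : Bool :=
  ((n % 10) % 2 == 0) && (if h : n / 10 = 0 then true else pvAux (n / 10))
termination_by n
decreasing_by omega

theorem pvEvenDigitChar (d : Nat) (hd : d < 10) :
    todosParesEvenDigit (Nat.digitChar d) = ((d % 2) == 0) := by
  interval_cases d <;> decide

theorem pvToDigitsCore_all (f : Nat) : ∀ (n : Nat) (acc : List Char), n < f →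
    (Nat.toDigitsCore 10 f n acc).all todosParesEvenDigit
      = (pvAux n && acc.all todosParesEvenDigit) := by
  induction f with
  | zero => intro n acc h; omega
  | succ f ih =>
    intro n acc h
    rw [Nat.toDigitsCore, pvAux]
    by_cases h0 : n / 10 = 0
    · simp only [h0, if_pos, dif_pos]
      simp [List.all_cons, pvEvenDigitChar (n % 10) (by omega)]
    · simp only [if_neg h0, dif_neg h0]
      rw [ih (n / 10) _ (by omega)]
      simp [List.all_cons, pvEvenDigitChar (n % 10) (by omega), Bool.and_assoc, Bool.and_comm]

theorem pvLoop_eq_aux (n : Nat) (hn : 0 < n) : todosParesLoop (n : Int) = pvAux n := by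
  induction n using Nat.strong_induction_on with
  | _ n ih =>
    rw [todosParesLoop, pvAux]
    rw [if_pos (show ((n : Int) > 0) by exact_mod_cast hn)]
    have hm : PySem.Int.mod (n : Int) 10 = ((n % 10 : Nat) : Int) := PySem.Int.mod_natCast n 10
    have hm2 : PySem.Int.mod ((n % 10 : Nat) : Int) 2 = ((n % 10 % 2 : Nat) : Int) := PySem.Int.mod_natCast (n % 10) 2
    have hd : PySem.Int.floordiv (n : Int) 10 = ((n / 10 : Nat) : Int) := PySem.Int.floordiv_natCast n 10
    rw [hm, hm2, hd]
    by_cases hpar : n % 10 % 2 = 0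
    · rw [if_neg (show ¬¬((((n % 10 % 2 : Nat) : Int) == 0) = true) by simp [hpar])]
      by_cases h0 : n / 10 = 0
      · rw [dif_pos h0, h0]
        simp [todosParesLoop, hpar]
      · rw [dif_neg h0, ih (n / 10) (by omega) (by omega)]
        simp [hpar]
    · rw [if_pos (show ¬((((n % 10 % 2 : Nat) : Int) == 0) = true) by simp; omega)]
      have hb : ((n % 10 % 2 == 0) : Bool) = false := by simpa using hpar
      rw [hb, Bool.false_and]

-- ===== VERDICT (by name: the statement is the Claim_ definition above) =====
theorem todos_pares_spec : Claim_equal_todos_pares := by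
  intro num _
  unfold Spec_todos_pares todos_pares todos_pares_alt
  by_cases hz : num = 0
  · simp [hz]
  · rw [if_neg (by simpa using hz)]
    by_cases hle : num ≤ 0
    · rw [if_pos hle, todosParesLoop, if_neg (by omega)]
    · rw [if_neg hle]
      have hpos : 0 < num := by omega
      have h1 : PySem.Int.toChars num = Nat.toDigits 10 num.toNat := by
        unfold PySem.Int.toChars
        rw [if_neg (by omega)]
      rw [h1, Nat.toDigits, pvToDigitsCore_all _ _ _ (by omega)]
      have h3 := pvLoop_eq_aux num.toNat (by omega)
      rw [show ((num.toNat : Nat) : Int) = num by omega] at h3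
      rw [h3]
      simp
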